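-- pv_equiv track=rewrite | github.com/Kim-Dong-Jun99/Programmers | 연습문제/리코쳇로봇.py | solution
-- ===== SOURCE A (Python) =====
-- def solution(board):
--     # 17:34
--     # 17:51
--     curLoc = [0,0]
--     dest = [0,0]
--     visited = [[0 for _ in range(len(board[0]))] for _ in range(len(board))]
--     for i in range(len(board)):
--         for j in range(len(board[0])):
--             if board[i][j] == "R":
--                 curLoc = [i, j]
--                 visited[i][j] = 1
--             if board[i][j] == "G":
--                 dest = [i, j]
--     nextNode = [curLoc]
--     answer = 0
--
--     possible = False
--     while nextNode:
--         temp = []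
--         for i, j in nextNode:
--             for nextI, nextJ in can_go(i, j, board, visited):
--                 visited[nextI][nextJ] = 1
--                 temp.append([nextI, nextJ])
--         answer += 1
--         if visited[dest[0]][dest[1]] == 1:
--             possible = True
--             break
--         nextNode = temp
--
--     if possible:
--         return answer
--     else:
--         return -1
--
-- def can_go(i, j, board, visited):
--     result = []
--     topIndex = i
--     while topIndex - 1 >= 0:
--         if board[topIndex-1][j] != "D":
--             topIndex -= 1
--         else:
--             break
--     if visited[topIndex][j] == 0:
--         result.append([topIndex, j])
--
--     bottomIndex = i
--     while bottomIndex + 1 < len(board):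
--         if board[bottomIndex+1][j] != "D":
--             bottomIndex += 1
--         else:
--             break
--     if visited[bottomIndex][j] == 0:
--         result.append([bottomIndex, j])
--
--     leftIndex = j
--     while leftIndex - 1 >= 0:
--         if board[i][leftIndex - 1] != "D":
--             leftIndex -= 1
--         else:
--             break
--     if visited[i][leftIndex] == 0:
--         result.append([i, leftIndex])
--
--     rightIndex = j
--     while rightIndex + 1 < len(board[0]):
--         if board[i][rightIndex + 1] != "D":
--             rightIndex += 1
--         else:
--             break
--     if visited[i][rightIndex] == 0:
--         result.append([i, rightIndex])
--
--     return result
-- ===== SOURCE B (Python) =====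
-- def fore_slide(line):
--     # dest[k] = index reached sliding toward index 0 from k, blocked by "D"
--     res = []
--     for k in range(len(line)):
--         if k == 0 or line[k - 1] == "D":
--             res.append(k)
--         else:
--             res.append(res[-1])
--     return res
--
--
-- def back_slide(line):
--     n = len(line)
--     return [n - 1 - d for d in reversed(fore_slide(line[::-1]))]
--
--
-- def can_go2(i, j, up, down, left, right, visited):
--     dests = [(up[j][i], j), (down[j][i], j), (i, left[i][j]), (i, right[i][j])]
--     return [d for d in dests if visited[d[0]][d[1]] == 0]
--
--
-- def solution(board):
--     R, C = len(board), len(board[0])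
--     cols = [[r[j] for r in board] for j in range(C)]
--     up = [fore_slide(c) for c in cols]
--     down = [back_slide(c) for c in cols]
--     left = [fore_slide(r[:C]) for r in board]
--     right = [back_slide(r[:C]) for r in board]
--
--     curLoc = (0, 0)
--     dest = (0, 0)
--     visited = [[0 for _ in range(C)] for _ in range(R)]
--     for i in range(R):
--         for j in range(C):
--             if board[i][j] == "R":
--                 curLoc = (i, j)
--                 visited[i][j] = 1
--             if board[i][j] == "G":
--                 dest = (i, j)
--
--     frontier = [curLoc]
--     answer = 0
--     while frontier:
--         layer = []
--         for i, j in frontier: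
--             for a, b in can_go2(i, j, up, down, left, right, visited):
--                 visited[a][b] = 1
--                 layer.append((a, b))
--         answer += 1
--         if visited[dest[0]][dest[1]] == 1:
--             return answer
--         frontier = layer
--     return -1
-- ===== Notes on version B (the rewrite author's own statement) =====
-- stated objective: alternative
-- what changed: B precomputes every cell's slide destination for all four directions with one linear prefix scan per row/column (and its reverse), so the BFS expands each cell by four table lookups instead of A's four per-expansion while-loop scans.
import Mathlib
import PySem

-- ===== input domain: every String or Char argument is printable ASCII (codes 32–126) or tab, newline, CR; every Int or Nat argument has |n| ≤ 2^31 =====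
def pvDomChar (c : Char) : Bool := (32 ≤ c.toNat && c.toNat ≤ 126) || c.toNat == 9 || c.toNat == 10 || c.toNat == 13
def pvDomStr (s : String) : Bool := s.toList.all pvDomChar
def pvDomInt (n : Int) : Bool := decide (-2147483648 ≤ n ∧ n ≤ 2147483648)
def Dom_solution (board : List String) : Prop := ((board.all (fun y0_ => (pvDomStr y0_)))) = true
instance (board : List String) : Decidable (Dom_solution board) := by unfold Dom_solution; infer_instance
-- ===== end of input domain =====

-- B replaces A's four per-expansion while-loop scans by slide-destination tables
-- precomputed with one prefix scan per row/column and its reverse (objective: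
-- alternative; same measured cost on typical inputs).

-- ===== shared helpers (used verbatim by both ports) =====

-- board[i][j] : 1-char string, as Option Char (none exactly where Python raises)
def getCell (b : List String) (i j : Int) : Option Char :=
  (PySem.List.pyGet? b i).bind (fun s => PySem.List.pyGet? s.toList j)

-- visited[i][j] read/write; total forms, exact on in-range indices (guaranteed by Pre_)
def get2 (v : List (List Int)) (i j : Int) : Int :=
  PySem.List.pyGetD (PySem.List.pyGetD v i []) j 0

def set2 (v : List (List Int)) (i j x : Int) : List (List Int) :=
  PySem.List.pySetD v i (PySem.List.pySetD (PySem.List.pyGetD v i []) j x)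

def Rlen (b : List String) : Int := (b.length : Int)          -- len(board)
-- len(board[0]); board[0] totalized with "" (Python raises there: outside Pre_)
def Clen (b : List String) : Int := (((PySem.List.pyGetD b 0 "").toList).length : Int)

-- the R/G scan (identical in Source A and Source B): returns (curLoc, dest, visited)
def scanRG (b : List String) (v0 : List (List Int)) :
    (Int × Int) × (Int × Int) × List (List Int) :=
  (PySem.List.pyRange 0 (Rlen b) 1).foldl (fun st i =>
    (PySem.List.pyRange 0 (Clen b) 1).foldl (fun st j =>
      let st := if getCell b i j = some 'R' then ((i, j), st.2.1, set2 st.2.2 i j 1) else st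
      if getCell b i j = some 'G' then (st.1, (i, j), st.2.2) else st) st) ((0, 0), (0, 0), v0)

def mkVisited (b : List String) : List (List Int) :=
  (PySem.List.pyRange 0 (Rlen b) 1).map (fun _ =>
    (PySem.List.pyRange 0 (Clen b) 1).map (fun _ => (0 : Int)))

-- ===== PORT A =====

-- the four while loops of can_go, parametrised only by the cell accessor
-- (decrementing: top/left; incrementing with a bound: bottom/right); each call
-- performs exactly the steps of the corresponding Python while loop
def whileDec (f : Int → Option Char) (t : Int) : Int :=
  if h : 0 ≤ t - 1 then
    (if f (t - 1) ≠ some 'D' then whileDec f (t - 1) else t)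
  else t
termination_by t.toNat
decreasing_by omega

def whileInc (f : Int → Option Char) (bound t : Int) : Int :=
  if h : t + 1 < bound then
    (if f (t + 1) ≠ some 'D' then whileInc f bound (t + 1) else t)
  else t
termination_by (bound - t).toNat
decreasing_by omega

def canGoA (b : List String) (i j : Int) (visited : List (List Int)) : List (Int × Int) :=
  let top := whileDec (fun t => getCell b t j) i
  let r1 := if get2 visited top j = 0 then [(top, j)] else []
  let bot := whileInc (fun t => getCell b t j) (Rlen b) i
  let r2 := if get2 visited bot j = 0 then [(bot, j)] else []
  let lef := whileDec (fun t => getCell b i t) j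
  let r3 := if get2 visited i lef = 0 then [(i, lef)] else []
  let rig := whileInc (fun t => getCell b i t) (Clen b) j
  let r4 := if get2 visited i rig = 0 then [(i, rig)] else []
  r1 ++ r2 ++ r3 ++ r4

-- the `while nextNode:` loop; fuel is only a totality guard (inside Pre_ the loop
-- runs at most R*C+1 times, so fuel R*C+2 is never exhausted)
def bfsA (b : List String) (dest : Int × Int) :
    Nat → List (Int × Int) → List (List Int) → Int → Int
  | 0, _, _, _ => -1
  | fuel + 1, nextNode, visited, answer =>
    if nextNode = [] then -1
    else
      let st := nextNode.foldl (fun (st : List (List Int) × List (Int × Int)) c =>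
        (canGoA b c.1 c.2 st.1).foldl
          (fun st2 d => (set2 st2.1 d.1 d.2 1, st2.2 ++ [d])) st) (visited, [])
      let answer := answer + 1
      if get2 st.1 dest.1 dest.2 = 1 then answer
      else bfsA b dest fuel st.2 st.1 answer

def solution (board : List String) : Int :=
  let s := scanRG board (mkVisited board)
  bfsA board s.2.1 ((Rlen board * Clen board).toNat + 2) [s.1] s.2.2 0

-- ===== PORT B =====

-- fore_slide: one prefix scan; carries (absolute index k, previous char, previous dest)
def foreGo : List Char → Int → Option Char → Int → List Int
  | [], _, _, _ => []
  | c :: rest, k, pc, pd =>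
    let d := if k = 0 ∨ pc = some 'D' then k else pd
    d :: foreGo rest (k + 1) (some c) d

def foreSlide (l : List Char) : List Int := foreGo l 0 none 0

-- back_slide(line) = [n-1-d for d in reversed(fore_slide(line[::-1]))]
def backSlide (l : List Char) : List Int :=
  (foreSlide l.reverse).reverse.map (fun d => (l.length : Int) - 1 - d)

-- [r[j] for r in board]; r[j] totalized with ' ' (in range for j < C under Pre_)
def colChars (b : List String) (j : Int) : List Char :=
  b.map (fun r => PySem.List.pyGetD r.toList j ' ')

-- r[:C] (exact: C = len(board[0]) ≥ 0, and Python's s[:n] for n ≥ 0 is take n)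
def rowCut (b : List String) (r : String) : List Char :=
  r.toList.take (Clen b).toNat

def canGoB (up down left right : List (List Int)) (i j : Int)
    (visited : List (List Int)) : List (Int × Int) :=
  let dests := [(get2 up j i, j), (get2 down j i, j), (i, get2 left i j), (i, get2 right i j)]
  dests.filter (fun d => get2 visited d.1 d.2 = 0)

def bfsB (up down left right : List (List Int)) (dest : Int × Int) :
    Nat → List (Int × Int) → List (List Int) → Int → Int
  | 0, _, _, _ => -1
  | fuel + 1, frontier, visited, answer =>
    if frontier = [] then -1
    else
      let st := frontier.foldl (fun (st : List (List Int) × List (Int × Int)) c =>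
        (canGoB up down left right c.1 c.2 st.1).foldl
          (fun st2 d => (set2 st2.1 d.1 d.2 1, st2.2 ++ [d])) st) (visited, [])
      let answer := answer + 1
      if get2 st.1 dest.1 dest.2 = 1 then answer
      else bfsB up down left right dest fuel st.2 st.1 answer

def solution_alt (board : List String) : Int :=
  let cols := (PySem.List.pyRange 0 (Clen board) 1).map (fun j => colChars board j)
  let up := cols.map foreSlide
  let down := cols.map backSlide
  let left := board.map (fun r => foreSlide (rowCut board r))
  let right := board.map (fun r => backSlide (rowCut board r))
  let s := scanRG board (mkVisited board)
  bfsB up down left right s.2.1 ((Rlen board * Clen board).toNat + 2) [s.1] s.2.2 0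

-- ===== PRECONDITION & SPEC =====

-- Pre_ is exactly where Python A returns: a nonempty board whose first row is
-- nonempty and every row has at least len(board[0]) characters (otherwise A's
-- indexing raises IndexError).
def Pre_solution (board : List String) : Prop :=
  board ≠ [] ∧ 0 < Clen board ∧ ∀ s ∈ board, Clen board ≤ (s.toList.length : Int)

instance (board : List String) : Decidable (Pre_solution board) := by
  unfold Pre_solution; infer_instance

def pvWitness_solution : List String := ["R.G", "D.."]

def Spec_solution (board : List String) (out : Int) : Prop := out = solution_alt board
instance (board : List String) (out : Int) : Decidable (Spec_solution board out) := by
  unfold Spec_solution; infer_instance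

-- ===== CLAIM (what is proved, stated in full; the proofs are below) =====
def Claim_equal_solution : Prop :=
  ∀ (board : List String), Dom_solution board → Pre_solution board →
    Spec_solution board (solution board)

-- ===== LEMMAS AND PROOFS =====

-- closed recurrence shared by the while loops and the scans: destination of an
-- upward (index-decreasing) slide from m in a line l
def upNat (l : List Char) : Nat → Nat
  | 0 => 0
  | m + 1 => if l[m]? = some 'D' then m + 1 else upNat l m

-- mirror of foreGo's element at position m
def goVal : List Char → Int → Option Char → Int → Nat → Int
  | [], _, _, pd, _ => pd
  | _ :: _, k, pc, pd, 0 => if k = 0 ∨ pc = some 'D' then k else pd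
  | c :: rest, k, pc, pd, m + 1 =>
    goVal rest (k + 1) (some c) (if k = 0 ∨ pc = some 'D' then k else pd) m

theorem foreGo_length (l : List Char) (k : Int) (pc : Option Char) (pd : Int) :
    (foreGo l k pc pd).length = l.length := by
  induction l generalizing k pc pd with
  | nil => rfl
  | cons c rest ih => simp [foreGo, ih]

theorem foreGo_get (l : List Char) (k : Int) (pc : Option Char) (pd : Int)
    (m : Nat) (hm : m < l.length) :
    (foreGo l k pc pd)[m]? = some (goVal l k pc pd m) := by
  induction l generalizing k pc pd m with
  | nil => simp at hm
  | cons c rest ih =>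
    cases m with
    | zero => simp [foreGo, goVal]
    | succ m => simpa [foreGo, goVal] using ih _ _ _ m (by simpa using hm)

theorem goVal_succ (l : List Char) (k : Nat) (pc : Option Char) (pd : Int)
    (m : Nat) (hm : m + 1 < l.length) :
    goVal l (k : Int) pc pd (m + 1) =
      if l[m]? = some 'D' then ((k + m + 1 : Nat) : Int)
      else goVal l (k : Int) pc pd m := by
  induction l generalizing k pc pd m with
  | nil => simp at hm
  | cons c rest ih =>
    cases m with
    | zero =>
      cases rest with
      | nil => simp at hm
      | cons c' rest' =>
        simp only [goVal, List.getElem?_cons_zero]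
        have hk : ((k : Int) + 1) = ((k + 1 : Nat) : Int) := by push_cast; ring
        rw [hk]
        by_cases hc : c = 'D'
        · subst hc; simp
        · simp [hc]
          intro h; exfalso; omega
    | succ m =>
      have h2 : m + 1 < rest.length := by simpa using hm
      simp only [goVal, List.getElem?_cons_succ]
      have hk : ((k : Int) + 1) = ((k + 1 : Nat) : Int) := by push_cast; ring
      rw [hk, ih (k+1) (some c) _ m h2]
      have : ((k + 1 + m + 1 : Nat) : Int) = ((k + (m+1) + 1 : Nat) : Int) := by push_cast; ring
      rw [this]


theorem goVal_eq_upNat (l : List Char) (m : Nat) (hm : m < l.length) :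
    goVal l 0 none 0 m = ((upNat l m : Nat) : Int) := by
  induction m with
  | zero =>
    cases l with
    | nil => simp at hm
    | cons c rest => simp [goVal, upNat]
  | succ m ih =>
    have h := goVal_succ l 0 none 0 m hm
    simp only [Nat.cast_zero, Nat.zero_add] at h
    rw [h, upNat]
    split
    · simp
    · exact ih (by omega)

theorem foreSlide_get (l : List Char) (m : Nat) (hm : m < l.length) :
    (foreSlide l)[m]? = some ((upNat l m : Nat) : Int) := by
  rw [foreSlide, foreGo_get _ _ _ _ m hm, goVal_eq_upNat l m hm]

theorem foreSlide_length (l : List Char) : (foreSlide l).length = l.length :=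
  foreGo_length l 0 none 0

theorem backSlide_get (l : List Char) (m : Nat) (hm : m < l.length) :
    (backSlide l)[m]? =
      some ((l.length : Int) - 1 - ((upNat l.reverse (l.length - 1 - m) : Nat) : Int)) := by
  have hlen : (foreSlide l.reverse).length = l.length := by
    rw [foreSlide_length, List.length_reverse]
  have hm1 : m < (foreSlide l.reverse).length := by omega
  have hm2 : (foreSlide l.reverse).length - 1 - m < l.reverse.length := by
    rw [List.length_reverse]; omega
  rw [backSlide, List.getElem?_map, List.getElem?_reverse hm1,
    foreSlide_get _ _ (by omega), hlen]
  simp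

theorem backSlide_length (l : List Char) : (backSlide l).length = l.length := by
  simp [backSlide, foreSlide_length]

theorem upNat_le (l : List Char) (m : Nat) : upNat l m ≤ m := by
  induction m with
  | zero => simp [upNat]
  | succ m ih => rw [upNat]; split <;> omega

theorem whileDec_eq (f : Int → Option Char) (l : List Char)
    (hf : ∀ m : Nat, m < l.length → f (m : Int) = l[m]?)
    (m : Nat) (hm : m < l.length) :
    whileDec f (m : Int) = ((upNat l m : Nat) : Int) := by
  induction m with
  | zero =>
    rw [whileDec]
    norm_num [upNat]
  | succ m ih =>
    rw [whileDec]
    have hc : ((m + 1 : Nat) : Int) - 1 = (m : Int) := by push_cast; ring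
    rw [dif_pos (by omega), hc, hf m (by omega), upNat]
    split
    · rename_i hD
      exact ih (by omega)
    · rename_i hD
      rw [if_pos (by simpa using hD)]

theorem whileInc_eq (f : Int → Option Char) (l : List Char)
    (hf : ∀ m : Nat, m < l.length → f (m : Int) = l[m]?)
    (m : Nat) (hm : m < l.length) :
    whileInc f (l.length : Int) (m : Int) =
      (l.length : Int) - 1 - ((upNat l.reverse (l.length - 1 - m) : Nat) : Int) := by
  suffices h : ∀ p m, m < l.length → l.length - 1 - m = p →
      whileInc f (l.length : Int) (m : Int) =
        (l.length : Int) - 1 - ((upNat l.reverse (l.length - 1 - m) : Nat) : Int) from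
    h _ m hm rfl
  intro p
  induction p with
  | zero =>
    intro m hm hp
    rw [whileInc, dif_neg (by omega), hp]
    simp [upNat]
    omega
  | succ p ih =>
    intro m hm hp
    have hm1 : m + 1 < l.length := by omega
    have hrev : l.reverse[p]? = l[m + 1]? := by
      rw [List.getElem?_reverse (by omega)]
      congr 1
      omega
    have hc : (m : Int) + 1 = ((m + 1 : Nat) : Int) := by push_cast; ring
    rw [whileInc, dif_pos (by omega), hc, hf (m + 1) hm1, hp, upNat, hrev]
    split
    · rename_i hD
      have h2 := ih (m + 1) hm1 (by omega)
      rw [show l.length - 1 - (m + 1) = p from by omega] at h2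
      exact h2
    · rename_i hD
      rw [if_pos (by simpa using hD)]
      omega

-- proof-side names for the tables solution_alt builds
def upT (b : List String) : List (List Int) :=
  ((PySem.List.pyRange 0 (Clen b) 1).map (fun j => colChars b j)).map foreSlide
def downT (b : List String) : List (List Int) :=
  ((PySem.List.pyRange 0 (Clen b) 1).map (fun j => colChars b j)).map backSlide
def leftT (b : List String) : List (List Int) := b.map (fun r => foreSlide (rowCut b r))
def rightT (b : List String) : List (List Int) := b.map (fun r => backSlide (rowCut b r))

def InR (b : List String) (c : Int × Int) : Prop :=
  0 ≤ c.1 ∧ c.1 < Rlen b ∧ 0 ≤ c.2 ∧ c.2 < Clen b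

theorem colChars_length (b : List String) (j : Int) :
    (colChars b j).length = b.length := by simp [colChars]

theorem rowCut_length (b : List String) (hpre : Pre_solution b) (r : String) (hr : r ∈ b) :
    (rowCut b r).length = (Clen b).toNat := by
  have := hpre.2.2 r hr
  rw [rowCut, List.length_take]
  omega

theorem getCell_col (b : List String) (hpre : Pre_solution b) (j : Int)
    (hj0 : 0 ≤ j) (hjC : j < Clen b) (m : Nat) (hm : m < b.length) :
    getCell b (m : Int) j = (colChars b j)[m]? := by
  have hrmem : b[m] ∈ b := List.getElem_mem hm
  have hlen : j < ((b[m]).toList.length : Int) := lt_of_lt_of_le hjC (hpre.2.2 _ hrmem)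
  unfold getCell colChars
  rw [PySem.List.pyGet?_natCast, List.getElem?_map, List.getElem?_eq_getElem hm]
  rw [Option.bind_some, Option.map_some, PySem.List.pyGet?_of_nonneg _ hj0,
    PySem.List.pyGetD_eq_getElem _ _ hj0 hlen, List.getElem?_eq_getElem (by omega)]

theorem getCell_row (b : List String) (hpre : Pre_solution b) (i : Int)
    (hi0 : 0 ≤ i) (hiR : i < Rlen b) (m : Nat) (hm : m < (Clen b).toNat)
    (hm2 : i.toNat < b.length) :
    getCell b i (m : Int) = (rowCut b b[i.toNat])[m]? := by
  have hrmem : b[i.toNat] ∈ b := List.getElem_mem hm2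
  have hlen : (Clen b : Int) ≤ ((b[i.toNat]).toList.length : Int) := hpre.2.2 _ hrmem
  unfold getCell rowCut
  rw [PySem.List.pyGet?_eq_some_getElem _ hi0 (by simpa using hiR), Option.bind_some,
    PySem.List.pyGet?_natCast, List.getElem?_take_of_lt hm,
    List.getElem?_eq_getElem (by omega)]

theorem look_up (b : List String) (_hpre : Pre_solution b) (i j : Int)
    (hi0 : 0 ≤ i) (hiR : i < Rlen b) (hj0 : 0 ≤ j) (hjC : j < Clen b) :
    get2 (upT b) j i = ((upNat (colChars b j) i.toNat : Nat) : Int) := by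
  have hidx : i.toNat < (foreSlide (colChars b j)).length := by
    rw [foreSlide_length, colChars_length]
    simp only [Rlen] at hiR
    omega
  unfold get2 upT
  rw [List.map_map,
    PySem.List.pyGetD_map_pyRange_of_nonneg _ _ _ _ hj0 hjC,
    Function.comp_apply,
    PySem.List.pyGetD_eq_getElem _ _ hi0 (by omega)]
  have h := foreSlide_get (colChars b j) i.toNat (by rw [← foreSlide_length]; exact hidx)
  rw [List.getElem?_eq_getElem hidx] at h
  exact Option.some.inj h

theorem look_down (b : List String) (_hpre : Pre_solution b) (i j : Int)
    (hi0 : 0 ≤ i) (hiR : i < Rlen b) (hj0 : 0 ≤ j) (hjC : j < Clen b) :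
    get2 (downT b) j i =
      (b.length : Int) - 1 -
        ((upNat (colChars b j).reverse (b.length - 1 - i.toNat) : Nat) : Int) := by
  have hcl : (colChars b j).length = b.length := colChars_length b j
  have hidx : i.toNat < (backSlide (colChars b j)).length := by
    rw [backSlide_length, colChars_length]
    simp only [Rlen] at hiR
    omega
  unfold get2 downT
  rw [List.map_map,
    PySem.List.pyGetD_map_pyRange_of_nonneg _ _ _ _ hj0 hjC,
    Function.comp_apply,
    PySem.List.pyGetD_eq_getElem _ _ hi0 (by omega)]
  have h := backSlide_get (colChars b j) i.toNat (by rw [← backSlide_length]; exact hidx)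
  rw [List.getElem?_eq_getElem hidx, hcl] at h
  exact Option.some.inj h

theorem look_left (b : List String) (hpre : Pre_solution b) (i j : Int)
    (hi0 : 0 ≤ i) (hiR : i < Rlen b) (hj0 : 0 ≤ j) (hjC : j < Clen b)
    (hm2 : i.toNat < b.length) :
    get2 (leftT b) i j = ((upNat (rowCut b b[i.toNat]) j.toNat : Nat) : Int) := by
  have hrc : (rowCut b b[i.toNat]).length = (Clen b).toNat :=
    rowCut_length b hpre _ (List.getElem_mem hm2)
  have hidx : j.toNat < (foreSlide (rowCut b b[i.toNat])).length := by
    rw [foreSlide_length, hrc]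
    omega
  unfold get2 leftT
  rw [PySem.List.pyGetD_eq_getElem _ _ hi0 (by simpa using hiR), List.getElem_map,
    PySem.List.pyGetD_eq_getElem _ _ hj0 (by omega)]
  have h := foreSlide_get (rowCut b b[i.toNat]) j.toNat (by rw [← foreSlide_length]; exact hidx)
  rw [List.getElem?_eq_getElem hidx] at h
  exact Option.some.inj h

theorem look_right (b : List String) (hpre : Pre_solution b) (i j : Int)
    (hi0 : 0 ≤ i) (hiR : i < Rlen b) (hj0 : 0 ≤ j) (hjC : j < Clen b)
    (hm2 : i.toNat < b.length) :
    get2 (rightT b) i j =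
      ((Clen b) : Int) - 1 -
        ((upNat (rowCut b b[i.toNat]).reverse ((Clen b).toNat - 1 - j.toNat) : Nat) : Int) := by
  have hrc : (rowCut b b[i.toNat]).length = (Clen b).toNat :=
    rowCut_length b hpre _ (List.getElem_mem hm2)
  have hidx : j.toNat < (backSlide (rowCut b b[i.toNat])).length := by
    rw [backSlide_length, hrc]
    omega
  unfold get2 rightT
  rw [PySem.List.pyGetD_eq_getElem _ _ hi0 (by simpa using hiR), List.getElem_map,
    PySem.List.pyGetD_eq_getElem _ _ hj0 (by omega)]
  have h := backSlide_get (rowCut b b[i.toNat]) j.toNat (by rw [← backSlide_length]; exact hidx)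
  rw [List.getElem?_eq_getElem hidx, hrc] at h
  rw [Option.some.inj h]
  have : ((Clen b).toNat : Int) = Clen b := by simp [Clen]
  rw [this]

theorem canGo_eq (b : List String) (hpre : Pre_solution b) (i j : Int)
    (h : InR b (i, j)) (v : List (List Int)) :
    canGoA b i j v = canGoB (upT b) (downT b) (leftT b) (rightT b) i j v := by
  obtain ⟨hi0, hiR, hj0, hjC⟩ := h
  have hm2 : i.toNat < b.length := by simp only [Rlen] at hiR; omega
  have hcl : (colChars b j).length = b.length := colChars_length b j
  have hrc : (rowCut b b[i.toNat]).length = (Clen b).toNat :=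
    rowCut_length b hpre _ (List.getElem_mem hm2)
  have hi : ((i.toNat : Nat) : Int) = i := Int.toNat_of_nonneg hi0
  have hj : ((j.toNat : Nat) : Int) = j := Int.toNat_of_nonneg hj0
  have hfc : ∀ m : Nat, m < (colChars b j).length →
      (fun t => getCell b t j) (m : Int) = (colChars b j)[m]? := by
    intro m hm
    exact getCell_col b hpre j hj0 hjC m (by omega)
  have hfr : ∀ m : Nat, m < (rowCut b b[i.toNat]).length →
      (fun t => getCell b i t) (m : Int) = (rowCut b b[i.toNat])[m]? := by
    intro m hm
    exact getCell_row b hpre i hi0 hiR m (by omega) hm2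
  have htop : whileDec (fun t => getCell b t j) i = get2 (upT b) j i := by
    have h1 := whileDec_eq (fun t => getCell b t j) _ hfc i.toNat (by rw [hcl]; omega)
    rw [hi] at h1
    rw [h1, look_up b hpre i j hi0 hiR hj0 hjC]
  have hbot : whileInc (fun t => getCell b t j) (Rlen b) i = get2 (downT b) j i := by
    have h1 := whileInc_eq (fun t => getCell b t j) _ hfc i.toNat (by rw [hcl]; omega)
    rw [hi, hcl] at h1
    rw [show Rlen b = ((b.length : Nat) : Int) from rfl, h1,
      look_down b hpre i j hi0 hiR hj0 hjC]
  have hlef : whileDec (fun t => getCell b i t) j = get2 (leftT b) i j := by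
    have h1 := whileDec_eq (fun t => getCell b i t) _ hfr j.toNat (by rw [hrc]; have h2 := hjC; simp only [Clen] at h2 ⊢; omega)
    rw [hj] at h1
    rw [h1, look_left b hpre i j hi0 hiR hj0 hjC hm2]
  have hrig : whileInc (fun t => getCell b i t) (Clen b) j = get2 (rightT b) i j := by
    have h1 := whileInc_eq (fun t => getCell b i t) _ hfr j.toNat (by rw [hrc]; have h2 := hjC; simp only [Clen] at h2 ⊢; omega)
    rw [hj, hrc] at h1
    rw [show Clen b = (((Clen b).toNat : Nat) : Int) from by simp [Clen], h1,
      look_right b hpre i j hi0 hiR hj0 hjC hm2]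
    simp [Clen]
  unfold canGoA canGoB
  dsimp only
  rw [htop, hbot, hlef, hrig]
  simp only [List.filter_cons, List.filter_nil, decide_eq_true_eq]
  split_ifs <;> simp

theorem canGoA_inR (b : List String) (hpre : Pre_solution b) (i j : Int)
    (h : InR b (i, j)) (v : List (List Int)) :
    ∀ c ∈ canGoA b i j v, InR b c := by
  obtain ⟨hi0, hiR, hj0, hjC⟩ := h
  have hm2 : i.toNat < b.length := by simp only [Rlen] at hiR; omega
  have hcl : (colChars b j).length = b.length := colChars_length b j
  have hrc : (rowCut b b[i.toNat]).length = (Clen b).toNat :=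
    rowCut_length b hpre _ (List.getElem_mem hm2)
  have hCpos : 0 < (Clen b).toNat := by
    have := hpre.2.1
    omega
  have hjc2 : j.toNat < (Clen b).toNat := by
    have h2 := hjC
    simp only [Clen] at h2 ⊢
    omega
  have hi : ((i.toNat : Nat) : Int) = i := Int.toNat_of_nonneg hi0
  have hj : ((j.toNat : Nat) : Int) = j := Int.toNat_of_nonneg hj0
  have hfc : ∀ m : Nat, m < (colChars b j).length →
      (fun t => getCell b t j) (m : Int) = (colChars b j)[m]? := by
    intro m hm
    exact getCell_col b hpre j hj0 hjC m (by omega)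
  have hfr : ∀ m : Nat, m < (rowCut b b[i.toNat]).length →
      (fun t => getCell b i t) (m : Int) = (rowCut b b[i.toNat])[m]? := by
    intro m hm
    exact getCell_row b hpre i hi0 hiR m (by omega) hm2
  have h1 := whileDec_eq (fun t => getCell b t j) _ hfc i.toNat (by rw [hcl]; omega)
  have h2 := whileInc_eq (fun t => getCell b t j) _ hfc i.toNat (by rw [hcl]; omega)
  have h3 := whileDec_eq (fun t => getCell b i t) _ hfr j.toNat (by omega)
  have h4 := whileInc_eq (fun t => getCell b i t) _ hfr j.toNat (by omega)
  rw [hi] at h1 h2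
  rw [hj] at h3 h4
  rw [hcl] at h2
  rw [hrc] at h4
  intro c hc
  unfold canGoA at hc
  dsimp only at hc
  rw [h1, h3] at hc
  rw [show Rlen b = ((b.length : Nat) : Int) from rfl, h2] at hc
  rw [show Clen b = (((Clen b).toNat : Nat) : Int) from by simp [Clen], h4] at hc
  have b1 := upNat_le (colChars b j) i.toNat
  have b2 := upNat_le (colChars b j).reverse (b.length - 1 - i.toNat)
  have b3 := upNat_le (rowCut b b[i.toNat]) j.toNat
  have b4 := upNat_le (rowCut b b[i.toNat]).reverse ((Clen b).toNat - 1 - j.toNat)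
  simp only [List.mem_append, List.mem_ite_nil_right, List.mem_singleton] at hc
  have hRi : Rlen b = ((b.length : Nat) : Int) := rfl
  have hCi : Clen b = (((Clen b).toNat : Nat) : Int) := by simp [Clen]
  have hiR2 : i < ((b.length : Nat) : Int) := hiR
  rcases hc with ((⟨-, rfl⟩ | ⟨-, rfl⟩) | ⟨-, rfl⟩) | ⟨-, rfl⟩ <;>
    (refine ⟨?_, ?_, ?_, ?_⟩ <;> omega)

theorem inner_snd (ds : List (Int × Int)) (st : List (List Int) × List (Int × Int)) :
    (ds.foldl (fun st2 d => (set2 st2.1 d.1 d.2 1, st2.2 ++ [d])) st).2 = st.2 ++ ds := by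
  induction ds generalizing st with
  | nil => simp
  | cons d ds ih => simp [ih]

theorem layer_eq (b : List String) (hpre : Pre_solution b)
    (frontier : List (Int × Int)) (st : List (List Int) × List (Int × Int))
    (hf : ∀ c ∈ frontier, InR b c) (hst : ∀ c ∈ st.2, InR b c) :
    (frontier.foldl (fun st c => (canGoA b c.1 c.2 st.1).foldl
        (fun st2 d => (set2 st2.1 d.1 d.2 1, st2.2 ++ [d])) st) st) =
      (frontier.foldl (fun st c => (canGoB (upT b) (downT b) (leftT b) (rightT b) c.1 c.2 st.1).foldl
        (fun st2 d => (set2 st2.1 d.1 d.2 1, st2.2 ++ [d])) st) st) ∧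
    (∀ c ∈ (frontier.foldl (fun st c => (canGoA b c.1 c.2 st.1).foldl
        (fun st2 d => (set2 st2.1 d.1 d.2 1, st2.2 ++ [d])) st) st).2, InR b c) := by
  induction frontier generalizing st with
  | nil => exact ⟨rfl, hst⟩
  | cons c fr ih =>
    have hc : InR b c := hf c (by simp)
    have hgo : canGoA b c.1 c.2 st.1 = canGoB (upT b) (downT b) (leftT b) (rightT b) c.1 c.2 st.1 := by
      have := canGo_eq b hpre c.1 c.2 hc st.1
      exact this
    simp only [List.foldl_cons]
    rw [← hgo]
    refine ih _ (fun d hd => hf d (by simp [hd])) ?_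
    intro d hd
    rw [inner_snd] at hd
    rcases List.mem_append.1 hd with h1 | h2
    · exact hst d h1
    · exact canGoA_inR b hpre c.1 c.2 hc st.1 d h2

theorem bfs_eq (b : List String) (hpre : Pre_solution b) (dest : Int × Int)
    (fuel : Nat) (frontier : List (Int × Int)) (visited : List (List Int)) (answer : Int)
    (hf : ∀ c ∈ frontier, InR b c) :
    bfsA b dest fuel frontier visited answer =
      bfsB (upT b) (downT b) (leftT b) (rightT b) dest fuel frontier visited answer := by
  induction fuel generalizing frontier visited answer with
  | zero => rfl
  | succ fuel ih =>
    rw [bfsA, bfsB]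
    dsimp only
    by_cases he : frontier = []
    · simp [he]
    · rw [if_neg he, if_neg he]
      obtain ⟨heq, hinr⟩ := layer_eq b hpre frontier (visited, []) hf (by simp)
      rw [← heq]
      split
      · rfl
      · exact ih _ _ _ hinr

theorem scan_inR (b : List String) (hpre : Pre_solution b) (v0 : List (List Int)) :
    InR b (scanRG b v0).1 := by
  have hR : (0 : Int) < Rlen b := by
    have h1 : 0 < b.length := List.length_pos_of_ne_nil hpre.1
    simp only [Rlen]
    omega
  unfold scanRG
  refine List.foldlRecOn (motive := fun (st : (Int × Int) × (Int × Int) × List (List Int)) => InR b st.1) _ _ ?_ ?_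
  · exact ⟨le_refl 0, hR, le_refl 0, hpre.2.1⟩
  · intro st hst x hx
    refine List.foldlRecOn (motive := fun (st : (Int × Int) × (Int × Int) × List (List Int)) => InR b st.1) _ _ hst ?_
    intro st2 hst2 y hy
    have hxb := PySem.List.mem_pyRange_one.mp hx
    have hyb := PySem.List.mem_pyRange_one.mp hy
    dsimp only
    split <;> split <;>
      first
        | exact hst2
        | exact ⟨hxb.1, hxb.2, hyb.1, hyb.2⟩

theorem solution_spec : Claim_equal_solution := by
  intro board hdom hpre
  unfold Spec_solution solution solution_alt
  show bfsA board _ _ _ _ _ = bfsB _ _ _ _ _ _ _ _ _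
  have h := bfs_eq board hpre (scanRG board (mkVisited board)).2.1
    ((Rlen board * Clen board).toNat + 2) [(scanRG board (mkVisited board)).1]
    (scanRG board (mkVisited board)).2.2 0
    (by intro c hc; simp at hc; subst hc; exact scan_inR board hpre (mkVisited board))
  simpa [upT, downT, leftT, rightT] using h
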